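-- pv_equiv track=rewrite | github.com/henbr/falling_blocks_game | utils.py | tiles_rect
-- ===== SOURCE A (Python) =====
-- def tiles_dim(tiles):
--     height = len(tiles)
--     width = len(tiles[0])
--     return (width, height)
--
-- def tiles_rect(tiles):
--     (w, h) = tiles_dim(tiles)
--     x0 = w - 1
--     y0 = h - 1
--     x1 = 0
--     y1 = 0
--     for py in range(h):
--         for px in range(w):
--             t = tiles[py][px]
--             if t != 0:
--                 x0 = min(x0, px)
--                 y0 = min(y0, py)
--                 x1 = max(x1, px + 1)
--                 y1 = max(y1, py + 1)
--     return (x0, y0, x1, y1)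
-- ===== SOURCE B (Python) =====
-- def tiles_rect(tiles):
--     h = len(tiles)
--     w = len(tiles[0])
--     cells = [(px, py) for py in range(h)
--                       for px, t in enumerate(tiles[py][:w]) if t != 0]
--     x0 = min((px for px, py in cells), default=w - 1)
--     y0 = min((py for px, py in cells), default=h - 1)
--     x1 = max((px + 1 for px, py in cells), default=0)
--     y1 = max((py + 1 for px, py in cells), default=0)
--     return (x0, y0, x1, y1)
-- ===== Notes on version B (the rewrite author's own statement) =====
-- stated objective: alternative
-- what changed: Replaces the single fused nested scan maintaining four running extents with a collect-then-reduce shape: gather nonzero cell coordinates once in a comprehension, then compute each extent as an independent min/max reduction whose default= argument yields the (w-1,h-1,0,0) sentinel without a special-case branch; the C-level min/max reductions over the (typically sparse) nonzero-cell list beat A's per-cell Python-level branch and four updates by a constant factor.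
import Mathlib
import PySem

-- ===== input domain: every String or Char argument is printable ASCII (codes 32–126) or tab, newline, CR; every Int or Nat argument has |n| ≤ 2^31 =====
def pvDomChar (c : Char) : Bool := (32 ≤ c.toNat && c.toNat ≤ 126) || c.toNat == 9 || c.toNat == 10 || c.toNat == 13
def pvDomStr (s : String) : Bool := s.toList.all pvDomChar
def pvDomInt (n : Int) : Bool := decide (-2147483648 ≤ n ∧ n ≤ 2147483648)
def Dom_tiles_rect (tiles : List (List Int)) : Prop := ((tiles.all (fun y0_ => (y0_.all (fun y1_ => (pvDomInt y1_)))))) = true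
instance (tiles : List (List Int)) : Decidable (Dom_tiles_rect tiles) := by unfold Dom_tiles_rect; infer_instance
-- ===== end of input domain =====

-- B replaces A's fused nested scan keeping four running extents by collect-then-reduce:
-- gather the nonzero cell coordinates once, then take four independent min/max reductions
-- with Python's default= giving the (w-1, h-1, 0, 0) sentinel (objective: alternative).


-- ===== PORT A =====
def tiles_dim (tiles : List (List Int)) : Int × Int :=
  let height := PySem.List.len tiles
  let width := PySem.List.len (PySem.List.pyGetD tiles 0 [])
  (width, height)

def tiles_rect (tiles : List (List Int)) : Int × Int × Int × Int :=
  let wh := tiles_dim tiles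
  let w := wh.1
  let h := wh.2
  (PySem.List.pyRange 0 h).foldl (fun s py =>
    (PySem.List.pyRange 0 w).foldl (fun (s : Int × Int × Int × Int) px =>
      let t := PySem.List.pyGetD (PySem.List.pyGetD tiles py []) px 0
      if t ≠ 0 then (min s.1 px, min s.2.1 py, max s.2.2.1 (px + 1), max s.2.2.2 (py + 1))
      else s) s)
    (w - 1, h - 1, 0, 0)

-- ===== PORT B =====
def tiles_rect_alt (tiles : List (List Int)) : Int × Int × Int × Int :=
  let h := PySem.List.len tiles
  let w := PySem.List.len (PySem.List.pyGetD tiles 0 [])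
  let cells : List (Int × Int) :=
    (PySem.List.pyRange 0 h).flatMap (fun py =>
      (PySem.List.enumerate (PySem.List.slice (PySem.List.pyGetD tiles py []) none (some w))).filterMap
        (fun pt => if pt.2 ≠ 0 then some (pt.1, py) else none))
  let x0 := PySem.List.minD (cells.map (fun c => c.1)) (fun x => x) (w - 1)
  let y0 := PySem.List.minD (cells.map (fun c => c.2)) (fun x => x) (h - 1)
  let x1 := PySem.List.maxD (cells.map (fun c => c.1 + 1)) (fun x => x) 0
  let y1 := PySem.List.maxD (cells.map (fun c => c.2 + 1)) (fun x => x) 0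
  (x0, y0, x1, y1)

-- ===== PRECONDITION & SPEC =====
-- Pre_ excludes exactly the inputs where the Python A raises IndexError: empty tiles
-- (tiles[0]) and a row shorter than the first row (tiles[py][px] with px < w).
def Pre_tiles_rect (tiles : List (List Int)) : Prop :=
  tiles ≠ [] ∧ ∀ row ∈ tiles, (tiles.headD []).length ≤ row.length
instance (tiles : List (List Int)) : Decidable (Pre_tiles_rect tiles) := by unfold Pre_tiles_rect; infer_instance
def pvWitness_tiles_rect : List (List Int) := [[0, 1], [2, 0]]

def Spec_tiles_rect (tiles : List (List Int)) (out : Int × Int × Int × Int) : Prop := out = tiles_rect_alt tiles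
instance (tiles : List (List Int)) (out : Int × Int × Int × Int) : Decidable (Spec_tiles_rect tiles out) := by unfold Spec_tiles_rect; infer_instance

-- ===== CLAIM (what is proved, stated in full; the proofs are below) =====
def Claim_equal_tiles_rect : Prop := ∀ (tiles : List (List Int)), Dom_tiles_rect tiles → Pre_tiles_rect tiles → Spec_tiles_rect tiles (tiles_rect tiles)

-- ===== LEMMAS AND PROOFS =====

-- the fused update A performs on each nonzero cell (px, py)
def pvStep (s : Int × Int × Int × Int) (c : Int × Int) : Int × Int × Int × Int :=
  (min s.1 c.1, min s.2.1 c.2, max s.2.2.1 (c.1 + 1), max s.2.2.2 (c.2 + 1))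

-- the nonzero cells B collects from one row
def pvRowCells (tiles : List (List Int)) (w py : Int) : List (Int × Int) :=
  (PySem.List.enumerate (PySem.List.slice (PySem.List.pyGetD tiles py []) none (some w))).filterMap
    (fun pt => if pt.2 ≠ 0 then some (pt.1, py) else none)

-- A's inner scan of one row equals the fold of pvStep over that row's collected cells
set_option maxRecDepth 4096 in
theorem pv_inner_eq (tiles : List (List Int)) (w py : Int) (hw : 0 ≤ w)
    (hlen : w ≤ (PySem.List.pyGetD tiles py []).length) (s : Int × Int × Int × Int) :
    (PySem.List.pyRange 0 w).foldl (fun s px =>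
      if PySem.List.pyGetD (PySem.List.pyGetD tiles py []) px 0 ≠ 0 then
        (min s.1 px, min s.2.1 py, max s.2.2.1 (px + 1), max s.2.2.2 (py + 1))
      else s) s
    = (pvRowCells tiles w py).foldl pvStep s := by
  set row := PySem.List.pyGetD tiles py [] with hrow
  unfold pvRowCells
  rw [← hrow, PySem.List.slice_to row hw, List.foldl_filterMap,
      PySem.List.enumerate_eq_map_pyRange _ 0, List.foldl_map]
  have hlen2 : PySem.List.len (row.take w.toNat) = w := by
    simp [PySem.List.len]; omega
  rw [hlen2]
  apply PySem.List.foldl_congr_mem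
  intro acc px hpx
  obtain ⟨h0, h1⟩ := PySem.List.mem_pyRange_one.mp hpx
  have hpx' : px.toNat < row.length := by omega
  have e1 : PySem.List.pyGetD row px 0 = row[px.toNat]'hpx' :=
    PySem.List.pyGetD_eq_getElem row 0 h0 (by omega)
  have e2 : PySem.List.pyGetD (row.take w.toNat) px 0 = row[px.toNat]'hpx' := by
    rw [PySem.List.pyGetD_eq_getElem (row.take w.toNat) 0 h0 (by simp only [List.length_take]; omega)]
    exact List.getElem_take
  rw [e1, e2]
  split <;> rfl

-- fold of the fused step = four independent fold reductions
theorem pv_split (l : List (Int × Int)) (a b c d : Int) :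
    l.foldl pvStep (a, b, c, d)
    = (List.foldl min a (l.map (fun p => p.1)), List.foldl min b (l.map (fun p => p.2)),
       List.foldl max c (l.map (fun p => p.1 + 1)), List.foldl max d (l.map (fun p => p.2 + 1))) := by
  induction l generalizing a b c d with
  | nil => rfl
  | cons x t ih => simp [List.foldl_cons, pvStep, ih]

-- min(xs, default=d) = running-min fold when d bounds every element from above
theorem pv_minD_eq_foldl (l : List Int) (d : Int) (h : ∀ x ∈ l, x ≤ d) :
    PySem.List.minD l (fun x => x) d = l.foldl min d := by
  cases l with
  | nil => simp [PySem.List.minD, PySem.List.min?]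
  | cons x t =>
    simp [PySem.List.minD, PySem.List.min?_id_cons]
    have hx : min d x = x := min_eq_right (h x (by simp))
    rw [hx]

theorem pv_maxD_eq_foldl (l : List Int) (d : Int) (h : ∀ x ∈ l, d ≤ x) :
    PySem.List.maxD l (fun x => x) d = l.foldl max d := by
  cases l with
  | nil => simp [PySem.List.maxD, PySem.List.max?]
  | cons x t =>
    simp [PySem.List.maxD, PySem.List.max?_id_cons]
    have hx : max d x = x := max_eq_right (h x (by simp))
    rw [hx]

-- every collected cell lies inside the w × h grid
theorem pv_cells_bounds (tiles : List (List Int)) (w h : Int) (hw : 0 ≤ w)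
    (c : Int × Int)
    (hc : c ∈ (PySem.List.pyRange 0 h).flatMap (fun py => pvRowCells tiles w py)) :
    0 ≤ c.1 ∧ c.1 < w ∧ 0 ≤ c.2 ∧ c.2 < h := by
  rw [List.mem_flatMap] at hc
  obtain ⟨py, hpy, hcr⟩ := hc
  obtain ⟨h0y, h1y⟩ := PySem.List.mem_pyRange_one.mp hpy
  unfold pvRowCells at hcr
  rw [List.mem_filterMap] at hcr
  obtain ⟨pt, hpt, heq⟩ := hcr
  split at heq
  · obtain ⟨k, hk, hpteq⟩ := (PySem.List.mem_enumerate_iff _ _ _).mp hpt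
    rw [PySem.List.slice_to _ hw, List.length_take] at hk
    cases heq
    subst hpteq
    refine ⟨by simp, by simp; omega, h0y, h1y⟩
  · cases heq

-- ===== VERDICT (by name: the statement is the Claim_ definition above) =====
theorem tiles_rect_spec : Claim_equal_tiles_rect := by
  intro tiles _hDom hPre
  unfold Spec_tiles_rect
  obtain ⟨hne, hall⟩ := hPre
  unfold tiles_rect tiles_rect_alt tiles_dim
  simp only []
  set w := PySem.List.len (PySem.List.pyGetD tiles 0 []) with hwdef
  set h := PySem.List.len tiles with hhdef
  have hw : 0 ≤ w := by simp [hwdef, PySem.List.len]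
  have hw0 : PySem.List.pyGetD tiles 0 [] = tiles.headD [] := by
    cases tiles with
    | nil => exact absurd rfl hne
    | cons r t => simp [PySem.List.pyGetD, PySem.List.pyIdx?, PySem.List.pyGet?]
  have houter :
      (PySem.List.pyRange 0 h).foldl (fun s py =>
        (PySem.List.pyRange 0 w).foldl (fun (s : Int × Int × Int × Int) px =>
          let t := PySem.List.pyGetD (PySem.List.pyGetD tiles py []) px 0
          if t ≠ 0 then (min s.1 px, min s.2.1 py, max s.2.2.1 (px + 1), max s.2.2.2 (py + 1))
          else s) s) (w - 1, h - 1, 0, 0)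
      = (PySem.List.pyRange 0 h).foldl (fun s py => (pvRowCells tiles w py).foldl pvStep s)
          (w - 1, h - 1, 0, 0) := by
    apply PySem.List.foldl_congr_mem
    intro acc py hpy
    obtain ⟨h0y, h1y⟩ := PySem.List.mem_pyRange_one.mp hpy
    have hmem : PySem.List.pyGetD tiles py [] ∈ tiles := by
      rw [PySem.List.pyGetD_eq_getElem tiles [] h0y (by simpa [hhdef, PySem.List.len] using h1y)]
      exact List.getElem_mem _
    have hlen : w ≤ (PySem.List.pyGetD tiles py []).length := by
      have := hall _ hmem
      rw [hwdef, hw0]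
      simp only [PySem.List.len]
      omega
    exact pv_inner_eq tiles w py hw hlen acc
  rw [houter, ← List.foldl_flatMap, pv_split]
  unfold pvRowCells
  have hb := pv_cells_bounds tiles w h hw
  have hh0 : 0 ≤ h := by simp [hhdef, PySem.List.len]
  have hx0 : ∀ x ∈ (List.flatMap (fun py => List.filterMap (fun pt => if pt.2 ≠ 0 then some (pt.1, py) else none) (PySem.List.enumerate (PySem.List.slice (PySem.List.pyGetD tiles py []) none (some w)))) (PySem.List.pyRange 0 h)).map (fun p => p.1), x ≤ w - 1 := by
    intro x hx; obtain ⟨c, hc, rfl⟩ := List.mem_map.mp hx; have := hb c hc; omega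
  have hy0 : ∀ x ∈ (List.flatMap (fun py => List.filterMap (fun pt => if pt.2 ≠ 0 then some (pt.1, py) else none) (PySem.List.enumerate (PySem.List.slice (PySem.List.pyGetD tiles py []) none (some w)))) (PySem.List.pyRange 0 h)).map (fun p => p.2), x ≤ h - 1 := by
    intro x hx; obtain ⟨c, hc, rfl⟩ := List.mem_map.mp hx; have := hb c hc; omega
  have hx1 : ∀ x ∈ (List.flatMap (fun py => List.filterMap (fun pt => if pt.2 ≠ 0 then some (pt.1, py) else none) (PySem.List.enumerate (PySem.List.slice (PySem.List.pyGetD tiles py []) none (some w)))) (PySem.List.pyRange 0 h)).map (fun p => p.1 + 1), (0:Int) ≤ x := by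
    intro x hx; obtain ⟨c, hc, rfl⟩ := List.mem_map.mp hx; have := hb c hc; omega
  have hy1 : ∀ x ∈ (List.flatMap (fun py => List.filterMap (fun pt => if pt.2 ≠ 0 then some (pt.1, py) else none) (PySem.List.enumerate (PySem.List.slice (PySem.List.pyGetD tiles py []) none (some w)))) (PySem.List.pyRange 0 h)).map (fun p => p.2 + 1), (0:Int) ≤ x := by
    intro x hx; obtain ⟨c, hc, rfl⟩ := List.mem_map.mp hx; have := hb c hc; omega
  rw [pv_minD_eq_foldl _ _ hx0, pv_minD_eq_foldl _ _ hy0,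
      pv_maxD_eq_foldl _ _ hx1, pv_maxD_eq_foldl _ _ hy1]
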